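-- pv_equiv track=rewrite | github.com/RicSegundo/HackerRank | Solved/No Idea!.py | happiness_counter
-- ===== SOURCE A (Python) =====
-- def happiness_counter(array, like, dislike):
--     happ_counter = 0
--     for elem in array:
--         if elem in like:
--             happ_counter += 1
--         if elem in dislike:
--             happ_counter -= 1
--
--     return happ_counter
-- ===== SOURCE B (Python) =====
-- def happiness_counter(array, like, dislike):
--     return (sum(array.count(v) for v in set(like))
--             - sum(array.count(v) for v in set(dislike)))
-- ===== Notes on version B (the rewrite author's own statement) =====
-- stated objective: alternative
-- what changed: B inverts the traversal: instead of scanning like/dislike for every array element, it iterates over the distinct liked and disliked values and sums how many times each occurs in the array (two set-driven counting sums, no per-element membership tests).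
import Mathlib
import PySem

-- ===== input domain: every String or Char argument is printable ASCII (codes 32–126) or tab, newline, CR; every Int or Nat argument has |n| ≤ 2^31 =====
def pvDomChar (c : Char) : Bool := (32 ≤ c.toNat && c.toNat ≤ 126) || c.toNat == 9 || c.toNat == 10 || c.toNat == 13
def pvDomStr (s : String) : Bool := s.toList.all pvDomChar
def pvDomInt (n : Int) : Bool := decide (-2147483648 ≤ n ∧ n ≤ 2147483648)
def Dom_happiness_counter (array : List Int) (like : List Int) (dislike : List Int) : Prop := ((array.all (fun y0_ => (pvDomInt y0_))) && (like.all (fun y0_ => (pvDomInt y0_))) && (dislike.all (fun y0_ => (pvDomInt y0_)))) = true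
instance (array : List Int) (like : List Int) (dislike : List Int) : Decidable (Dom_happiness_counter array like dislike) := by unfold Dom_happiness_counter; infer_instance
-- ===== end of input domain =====

-- B inverts the traversal: it sums, over the distinct liked (resp. disliked) values,
-- how often each occurs in the array, instead of testing membership per array element
-- (objective: alternative; correct since both compute Σ_x [x∈like] − Σ_x [x∈dislike]).

-- ===== PORT A =====
def happiness_counter (array : List Int) (like : List Int) (dislike : List Int) : Int :=
  array.foldl (fun happ_counter elem =>
    let happ_counter := if elem ∈ like then happ_counter + 1 else happ_counter
    if elem ∈ dislike then happ_counter - 1 else happ_counter) 0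

-- ===== PORT B =====
def happiness_counter_alt (array : List Int) (like : List Int) (dislike : List Int) : Int :=
  ((PySem.Set.ofList like).map (fun v => ((array.count v : Nat) : Int))).sum
    - ((PySem.Set.ofList dislike).map (fun v => ((array.count v : Nat) : Int))).sum

-- ===== PRECONDITION & SPEC =====
def Spec_happiness_counter (array : List Int) (like : List Int) (dislike : List Int) (out : Int) : Prop := out = happiness_counter_alt array like dislike
instance (array : List Int) (like : List Int) (dislike : List Int) (out : Int) : Decidable (Spec_happiness_counter array like dislike out) := by unfold Spec_happiness_counter; infer_instance

-- ===== CLAIM =====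
def Claim_equal_happiness_counter : Prop := ∀ (array : List Int) (like : List Int) (dislike : List Int), Dom_happiness_counter array like dislike → Spec_happiness_counter array like dislike (happiness_counter array like dislike)

-- ===== LEMMAS AND PROOFS =====

-- A's fold is the sum of per-element scores
theorem pvA_sum (array like dislike : List Int) :
    happiness_counter array like dislike
      = (array.map (fun x => (if x ∈ like then (1 : Int) else 0)
            - (if x ∈ dislike then 1 else 0))).sum := by
  unfold happiness_counter
  induction array using List.reverseRecOn with
  | nil => simp
  | append_singleton xs x ih =>
    rw [List.foldl_append, List.map_append, List.sum_append, ih]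
    simp only [List.foldl_cons, List.foldl_nil, List.map_singleton, List.sum_singleton]
    split_ifs <;> ring

-- indicator sum over a Nodup list
theorem pvInd_sum (x : Int) : ∀ (d : List Int), d.Nodup →
    (d.map (fun v => if v = x then (1 : Int) else 0)).sum
      = if x ∈ d then (1 : Int) else 0 := by
  intro d
  induction d with
  | nil => simp
  | cons a t ih =>
    intro hnd
    have hat : a ∉ t := (List.nodup_cons.mp hnd).1
    simp only [List.map_cons, List.sum_cons, ih (List.nodup_cons.mp hnd).2, List.mem_cons]
    rcases eq_or_ne a x with h | h
    · subst h; simp [hat]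
    · simp [h, Ne.symm h]

-- counting the array once per distinct value equals one indicator per array element
theorem pvCount_sum (d : List Int) (hd : d.Nodup) :
    ∀ (xs : List Int),
      (d.map (fun v => ((xs.count v : Nat) : Int))).sum
        = (xs.map (fun x => if x ∈ d then (1 : Int) else 0)).sum := by
  intro xs
  induction xs with
  | nil => simp
  | cons x t ih =>
    have h : (fun v => (((x :: t).count v : Nat) : Int))
        = fun v => ((t.count v : Nat) : Int) + (if v = x then 1 else 0) := by
      funext v
      rcases eq_or_ne v x with h | h
      · subst h; simp
      · simp [h, Ne.symm h]
    rw [h]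
    rw [List.sum_map_add, ih, pvInd_sum x d hd]
    simp [add_comm]

-- ===== VERDICT =====
theorem happiness_counter_spec : Claim_equal_happiness_counter := by
  intro array like dislike _
  show happiness_counter array like dislike = happiness_counter_alt array like dislike
  unfold happiness_counter_alt
  rw [pvCount_sum _ (PySem.Set.nodup_ofList like) array,
      pvCount_sum _ (PySem.Set.nodup_ofList dislike) array, pvA_sum]
  simp only [PySem.Set.mem_ofList]
  have hsub : ∀ xs : List Int,
      (xs.map (fun x => (if x ∈ like then (1 : Int) else 0)
          - (if x ∈ dislike then 1 else 0))).sum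
        = (xs.map (fun x => if x ∈ like then (1 : Int) else 0)).sum
          - (xs.map (fun x => if x ∈ dislike then (1 : Int) else 0)).sum := by
    intro xs
    induction xs with
    | nil => simp
    | cons x t ih => simp only [List.map_cons, List.sum_cons, ih]; ring
  exact hsub array
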